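-- pv_equiv track=rewrite | github.com/MahmoudTolba1/problem_solving | Code forces problems/A_Hit_the_Lottery.py | minimum_bills
-- ===== SOURCE A (Python) =====
-- def minimum_bills(n):
--     denominations = [100, 20, 10, 5, 1]
--
--     num_bills = 0
--
--     for bill in denominations:
--         if n == 0:
--             break
--         num_bills += n // bill
--         n %= bill
--
--     return num_bills
-- ===== SOURCE B (Python) =====
-- def minimum_bills(n):
--     # Since 1|5|10|20|100, the greedy bill count has a closed form built from
--     # independent floor divisions of n itself (no remainder chain):
--     # each unit not absorbed into a larger bill contributes, with inclusion-
--     # exclusion coefficients n - 4*(n//5) - n//10 - n//20 - 4*(n//100).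
--     return n - 4 * (n // 5) - n // 10 - n // 20 - 4 * (n // 100)
-- ===== Notes on version B (the rewrite author's own statement) =====
-- stated objective: alternative
-- what changed: The greedy loop maintaining a running remainder (div/mod cascade over denominations) is replaced by a closed-form inclusion-exclusion formula using only independent floor divisions of n itself (n - 4*(n//5) - n//10 - n//20 - 4*(n//100)), with no modulo, no remainder state and no per-denomination counts; correct because each denomination divides the next (1|5|10|20|100).
import Mathlib
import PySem

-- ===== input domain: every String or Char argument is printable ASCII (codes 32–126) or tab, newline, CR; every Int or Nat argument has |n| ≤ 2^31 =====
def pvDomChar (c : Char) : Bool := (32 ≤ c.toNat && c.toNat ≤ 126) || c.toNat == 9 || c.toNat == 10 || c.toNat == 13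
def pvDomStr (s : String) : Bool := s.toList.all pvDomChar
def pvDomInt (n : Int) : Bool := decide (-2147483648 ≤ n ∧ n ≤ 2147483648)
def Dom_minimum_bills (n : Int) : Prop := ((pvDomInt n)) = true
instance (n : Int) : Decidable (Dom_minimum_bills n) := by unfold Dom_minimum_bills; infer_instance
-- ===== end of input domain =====

-- B replaces A's greedy remainder-cascade loop by a closed-form inclusion-exclusion formula
-- over independent floor divisions of n (no modulo, no running remainder); objective: alternative.

-- ===== PORT A =====
-- the for-loop over denominations, with the 'if n == 0: break', as structural recursion
def minimum_bills_loop : List Int → Int → Int → Int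
  | [], _, acc => acc
  | bill :: rest, n, acc =>
      if n = 0 then acc
      else minimum_bills_loop rest (PySem.Int.mod n bill) (acc + PySem.Int.floordiv n bill)

def minimum_bills (n : Int) : Int :=
  minimum_bills_loop [100, 20, 10, 5, 1] n 0

-- ===== PORT B =====
def minimum_bills_alt (n : Int) : Int :=
  n - 4 * PySem.Int.floordiv n 5 - PySem.Int.floordiv n 10
    - PySem.Int.floordiv n 20 - 4 * PySem.Int.floordiv n 100

-- ===== PRECONDITION & SPEC =====
def Spec_minimum_bills (n : Int) (out : Int) : Prop := out = minimum_bills_alt n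
instance (n : Int) (out : Int) : Decidable (Spec_minimum_bills n out) := by unfold Spec_minimum_bills; infer_instance

-- ===== CLAIM =====
def Claim_equal_minimum_bills : Prop := ∀ (n : Int), Dom_minimum_bills n → Spec_minimum_bills n (minimum_bills n)

-- ===== LEMMAS AND PROOFS =====
theorem pv_fd (b : Int) (hb : 0 < b) (a : Int) : PySem.Int.floordiv a b = a / b :=
  PySem.Int.floordiv_eq_ediv_of_pos hb

theorem pv_md (b : Int) (hb : 0 < b) (a : Int) : PySem.Int.mod a b = a % b :=
  PySem.Int.mod_eq_emod_of_pos hb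

-- ===== VERDICT =====
theorem minimum_bills_spec : Claim_equal_minimum_bills := by
  intro n _
  show minimum_bills n = minimum_bills_alt n
  simp only [minimum_bills, minimum_bills_alt, minimum_bills_loop,
    pv_fd 100 (by norm_num), pv_fd 20 (by norm_num), pv_fd 10 (by norm_num),
    pv_fd 5 (by norm_num), pv_fd 1 (by norm_num),
    pv_md 100 (by norm_num), pv_md 20 (by norm_num), pv_md 10 (by norm_num),
    pv_md 5 (by norm_num)]
  split_ifs <;> omega
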